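-- pv_equiv track=rewrite | github.com/black-da-bull/EmbedChainlitPublic | utils.py | get_list_index_by_characters
-- ===== SOURCE A (Python) =====
-- def get_list_index_by_characters(strings, length_limit):
--     total_length = 0
--     n = 0
--
--     for string in strings:
--         if total_length + len(string) <= length_limit:
--             total_length += len(string)
--             n += 1
--         else:
--             break
--
--     return n
-- ===== SOURCE B (Python) =====
-- def get_list_index_by_characters(strings, length_limit):
--     # Build the prefix-sum table of cumulative lengths (non-decreasing, since
--     # lengths are non-negative), then binary-search for how many entries are
--     # <= length_limit (bisect_right semantics, hand-written as A imports nothing).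
--     total = 0
--     prefix = []
--     for s in strings:
--         total += len(s)
--         prefix.append(total)
--     lo, hi = 0, len(prefix)
--     while lo < hi:
--         mid = (lo + hi) // 2
--         if prefix[mid] <= length_limit:
--             lo = mid + 1
--         else:
--             hi = mid
--     return lo
-- ===== Notes on version B (the rewrite author's own statement) =====
-- stated objective: alternative
-- what changed: B replaces A's single accumulate-and-break scan with a two-phase algorithm: it materializes the prefix-sum table of cumulative lengths and then binary-searches (bisect_right semantics) for the count of entries <= length_limit, which is valid because lengths are non-negative so the table is non-decreasing.
import Mathlib
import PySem

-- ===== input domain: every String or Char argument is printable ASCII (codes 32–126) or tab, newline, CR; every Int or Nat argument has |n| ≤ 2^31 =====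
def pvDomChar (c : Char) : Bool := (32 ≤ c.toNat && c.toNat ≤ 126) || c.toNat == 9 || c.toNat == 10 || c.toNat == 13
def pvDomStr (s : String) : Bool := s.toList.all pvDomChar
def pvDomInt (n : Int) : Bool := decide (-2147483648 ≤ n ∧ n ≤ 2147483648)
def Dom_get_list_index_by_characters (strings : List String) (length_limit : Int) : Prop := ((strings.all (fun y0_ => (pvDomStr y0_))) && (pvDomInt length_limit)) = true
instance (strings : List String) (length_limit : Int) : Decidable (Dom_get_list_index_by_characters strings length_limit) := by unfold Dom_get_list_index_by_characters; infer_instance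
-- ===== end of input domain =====

-- B builds the prefix-sum table of cumulative lengths and binary-searches it
-- (bisect_right) instead of A's accumulate-and-break scan; same return value,
-- neither mutates the input.

-- ===== PORT A =====
-- A's loop: accumulate total_length and n, break at the first string that
-- would exceed the limit.
def pvGoA : List String → Int → Int → Int → Int
  | [], _, _, n => n
  | s :: rest, limit, total, n =>
    if total + PySem.Str.len s ≤ limit then
      pvGoA rest limit (total + PySem.Str.len s) (n + 1)
    else n

def get_list_index_by_characters (strings : List String) (length_limit : Int) : Int :=
  pvGoA strings length_limit 0 0

-- ===== PORT B =====
-- Source B's first loop: prefix.append(total) with total += len(s).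
def pvBuildPrefix (strings : List String) : Int × List Int :=
  strings.foldl (fun st s => (st.1 + PySem.Str.len s, st.2 ++ [st.1 + PySem.Str.len s])) (0, [])

-- Source B's while loop. lo and hi stay in 0..len(prefix) and are non-negative
-- throughout, so Nat with Nat division is exact for Python's ints with '//';
-- prefix[mid] is always in range (lo ≤ mid < hi ≤ len), so getD is exact.
def pvBs (pfx : List Int) (limit : Int) (lo hi : Nat) : Nat :=
  if lo < hi then
    let mid := (lo + hi) / 2
    if pfx.getD mid 0 ≤ limit then pvBs pfx limit (mid + 1) hi
    else pvBs pfx limit lo mid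
  else lo
termination_by hi - lo
decreasing_by all_goals omega

def get_list_index_by_characters_alt (strings : List String) (length_limit : Int) : Int :=
  let pfx := (pvBuildPrefix strings).2
  ((pvBs pfx length_limit 0 pfx.length : Nat) : Int)

-- ===== PRECONDITION & SPEC =====
def Spec_get_list_index_by_characters (strings : List String) (length_limit : Int) (out : Int) : Prop := out = get_list_index_by_characters_alt strings length_limit
instance (strings : List String) (length_limit : Int) (out : Int) : Decidable (Spec_get_list_index_by_characters strings length_limit out) := by unfold Spec_get_list_index_by_characters; infer_instance

-- ===== CLAIM (what is proved, stated in full; the proofs are below) =====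
def Claim_equal_get_list_index_by_characters : Prop := ∀ (strings : List String) (length_limit : Int), Dom_get_list_index_by_characters strings length_limit → Spec_get_list_index_by_characters strings length_limit (get_list_index_by_characters strings length_limit)

-- ===== LEMMAS AND PROOFS =====

-- The list of prefix sums of lengths starting from total t.
def pvPfx : Int → List String → List Int
  | _, [] => []
  | t, s :: rest => (t + PySem.Str.len s) :: pvPfx (t + PySem.Str.len s) rest

theorem pvBuildPrefix_go (l : List String) : ∀ (t : Int) (acc : List Int),
    l.foldl (fun st s => (st.1 + PySem.Str.len s, st.2 ++ [st.1 + PySem.Str.len s])) (t, acc)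
      = (t + (l.map PySem.Str.len).sum, acc ++ pvPfx t l) := by
  induction l with
  | nil => intro t acc; simp [pvPfx]
  | cons s rest ih =>
    intro t acc
    simp only [List.foldl_cons, pvPfx]
    rw [ih]
    simp
    ring

theorem pvBuildPrefix_snd (l : List String) : (pvBuildPrefix l).2 = pvPfx 0 l := by
  unfold pvBuildPrefix
  rw [pvBuildPrefix_go]
  simp

-- A's scan counts the prefix sums up to the first one exceeding the limit.
theorem pvGoA_eq (l : List String) : ∀ (limit t n : Int),
    pvGoA l limit t n = n + (((pvPfx t l).takeWhile (fun p => decide (p ≤ limit))).length : Int) := by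
  induction l with
  | nil => intro limit t n; simp [pvGoA, pvPfx]
  | cons s rest ih =>
    intro limit t n
    simp only [pvGoA, pvPfx, List.takeWhile_cons]
    by_cases h : t + PySem.Str.len s ≤ limit
    · rw [if_pos h, if_pos (by exact decide_eq_true h)]
      rw [ih]
      simp only [List.length_cons]
      push_cast
      ring
    · rw [if_neg h, if_neg (by simpa using h)]
      simp

-- the prefix sums are non-decreasing (string lengths are non-negative)
theorem pvPfx_head_le (l : List String) : ∀ (t : Int) (x : Int), x ∈ pvPfx t l → t ≤ x := by
  induction l with
  | nil => intro t x hx; simp [pvPfx] at hx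
  | cons s rest ih =>
    intro t x hx
    have hlen : (0 : Int) ≤ PySem.Str.len s := by
      rw [PySem.Str.len_eq]; exact_mod_cast Int.natCast_nonneg _
    simp only [pvPfx, List.mem_cons] at hx
    rcases hx with rfl | hx
    · omega
    · have := ih (t + PySem.Str.len s) x hx; omega

theorem pvPfx_sorted (l : List String) : ∀ (t : Int), (pvPfx t l).Pairwise (· ≤ ·) := by
  induction l with
  | nil => intro t; simp [pvPfx]
  | cons s rest ih =>
    intro t
    simp only [pvPfx, List.pairwise_cons]
    exact ⟨fun x hx => pvPfx_head_le rest _ x hx, ih _⟩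

-- takeWhile length from the "all below r hold, all from r fail" characterisation
theorem pvTakeWhile_len (limit : Int) : ∀ (l : List Int) (r : Nat), r ≤ l.length →
    (∀ (i : Nat) (h : i < l.length), i < r → l[i] ≤ limit) →
    (∀ (i : Nat) (h : i < l.length), r ≤ i → limit < l[i]) →
    (l.takeWhile (fun p => decide (p ≤ limit))).length = r := by
  intro l
  induction l with
  | nil =>
    intro r hr _ _
    have : r = 0 := by simp at hr; omega
    subst this
    rfl
  | cons x xs ih =>
    intro r hr hlo hhi
    cases r with
    | zero =>
      have hx : limit < x := hhi 0 (by simp) (Nat.zero_le _)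
      simp [List.takeWhile, show ¬ x ≤ limit by omega]
    | succ r' =>
      have hx : x ≤ limit := hlo 0 (by simp) (Nat.succ_pos _)
      simp only [List.takeWhile, decide_eq_true hx, List.length_cons]
      rw [ih r' (by simpa using hr)
        (fun i h hi => hlo (i + 1) (by simpa using h) (by omega))
        (fun i h hi => hhi (i + 1) (by simpa using h) (by omega))]

-- binary-search invariant: pvBs returns the boundary index
theorem pvBs_inv (l : List Int) (limit : Int) (hsorted : l.Pairwise (· ≤ ·)) :
    ∀ (fuel lo hi : Nat), hi - lo ≤ fuel → lo ≤ hi → hi ≤ l.length →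
    (∀ (i : Nat) (h : i < l.length), i < lo → l[i] ≤ limit) →
    (∀ (i : Nat) (h : i < l.length), hi ≤ i → limit < l[i]) →
    (pvBs l limit lo hi ≤ l.length ∧
      (∀ (i : Nat) (h : i < l.length), i < pvBs l limit lo hi → l[i] ≤ limit) ∧
      (∀ (i : Nat) (h : i < l.length), pvBs l limit lo hi ≤ i → limit < l[i])) := by
  intro fuel
  induction fuel with
  | zero =>
    intro lo hi hfuel hlh hhl hlo hhi
    have : lo = hi := by omega
    subst this
    rw [pvBs, if_neg (by omega)]
    exact ⟨by omega, hlo, hhi⟩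
  | succ f ihf =>
    intro lo hi hfuel hlh hhl hlo hhi
    rw [pvBs]
    by_cases hlt : lo < hi
    · rw [if_pos hlt]
      simp only []
      have hmid1 : lo ≤ (lo + hi) / 2 := by omega
      have hmid2 : (lo + hi) / 2 < hi := by omega
      have hmlen : (lo + hi) / 2 < l.length := by omega
      rw [List.getD_eq_getElem l 0 hmlen]
      by_cases hm : l[(lo + hi) / 2] ≤ limit
      · rw [if_pos hm]
        refine ihf ((lo + hi) / 2 + 1) hi (by omega) (by omega) hhl ?_ hhi
        intro i h hi'
        rcases Nat.lt_or_ge i lo with h' | h'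
        · exact hlo i h h'
        · rcases Nat.lt_or_ge i ((lo + hi) / 2) with h'' | h''
          · exact le_trans (List.pairwise_iff_getElem.mp hsorted i ((lo + hi) / 2) h hmlen h'') hm
          · have : i = (lo + hi) / 2 := by omega
            subst this; exact hm
      · rw [if_neg hm]
        refine ihf lo ((lo + hi) / 2) (by omega) (by omega) (by omega) hlo ?_
        intro i h hi'
        rcases Nat.lt_or_ge i l.length with _ | _
        · rcases Nat.eq_or_lt_of_le hi' with h' | h'
          · subst h'; omega
          · exact lt_of_lt_of_le (by omega : limit < l[(lo + hi) / 2])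
              (List.pairwise_iff_getElem.mp hsorted ((lo + hi) / 2) i hmlen h h')
        · omega
    · rw [if_neg hlt]
      have : lo = hi := by omega
      subst this
      exact ⟨by omega, hlo, hhi⟩

-- ===== VERDICT (by name: the statement is the Claim_ definition above) =====
theorem get_list_index_by_characters_spec : Claim_equal_get_list_index_by_characters := by
  intro strings limit _
  unfold Spec_get_list_index_by_characters get_list_index_by_characters
    get_list_index_by_characters_alt
  rw [pvBuildPrefix_snd, pvGoA_eq]
  have hinv := pvBs_inv (pvPfx 0 strings) limit (pvPfx_sorted strings 0)
    (pvPfx 0 strings).length 0 (pvPfx 0 strings).length (by omega) (by omega) (le_refl _)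
    (fun i h hi => by omega) (fun i h hi => by omega)
  rw [pvTakeWhile_len limit (pvPfx 0 strings) _ hinv.1 hinv.2.1 hinv.2.2]
  simp
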